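-- pv_equiv track=rewrite | github.com/raeez/chiral-bar-cobar | compute/lib/shadow_weil_conjectures_engine.py | count_projective_points
-- ===== SOURCE A (Python) =====
-- from typing import Any, Dict, List, Optional, Sequence, Tuple, Union
--
-- def count_affine_points(coeffs: List[int], p: int) -> int:
--     """Count affine points on y^2 = f(t) over F_p.
--
--     coeffs = [a0, a1, ..., a_d] where f(t) = sum a_i t^i.
--     Returns #{(t, y) in F_p x F_p : y^2 = f(t)}.
--
--     For each t in F_p, evaluate f(t) mod p:
--     - If f(t) = 0: one point (t, 0)
--     - If f(t) is a nonzero QR: two points (t, +-sqrt(f(t)))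
--     - If f(t) is a non-QR: zero points
--
--     Uses the Legendre symbol: #{y : y^2 = a} = 1 + (a/p).
--     """
--     count = 0
--     for t in range(p):
--         ft = 0
--         t_pow = 1
--         for a in coeffs:
--             ft = (ft + a * t_pow) % p
--             t_pow = (t_pow * t) % p
--         # Number of y with y^2 = ft mod p is 1 + legendre(ft, p)
--         count += 1 + legendre_symbol(ft, p)
--     return count
--
-- def legendre_symbol(a: int, p: int) -> int:
--     """Compute the Legendre symbol (a/p) for odd prime p.
--
--     Returns:
--         0 if a = 0 mod p
--         1 if a is a nonzero quadratic residue mod p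
--         -1 if a is a quadratic non-residue mod p
--     """
--     a = a % p
--     if a == 0:
--         return 0
--     # Euler's criterion: (a/p) = a^{(p-1)/2} mod p
--     val = pow(a, (p - 1) // 2, p)
--     if val == 1:
--         return 1
--     elif val == p - 1:
--         return -1
--     else:
--         return 0  # should not happen for prime p
--
-- def count_projective_points(coeffs: List[int], p: int) -> int:
--     """Count projective points on y^2 = f(t) over F_p.
--
--     Projective count = affine count + points at infinity.
--
--     For the curve y^2 = f(t) with deg(f) = d:
--     - If d is even and leading coeff is a QR mod p: 2 points at infinity
--     - If d is even and leading coeff is a non-QR: 0 points at infinity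
--     - If d is odd: 1 point at infinity
--
--     For the shadow curve f(t) = q0*t^4 + q1*t^5 + q2*t^6 (degree 6):
--     Points at infinity from homogenizing: Y^2 = q0*T^4*Z^2 + q1*T^5*Z + q2*T^6
--     Setting Z=0: Y^2 = q2*T^6, so Y = +-sqrt(q2)*T^3.
--     If q2 = 0: one point [1:0:0].
--     If q2 is QR: two points [T:Y:0] with Y^2 = q2*T^6.
--     Since [T:Y:0] = [1:+-sqrt(q2):0], there are 2 points at infinity.
--     If q2 is non-QR: 0 points at infinity.
--     """
--     affine = count_affine_points(coeffs, p)
--     # Determine degree and leading coefficient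
--     d = len(coeffs) - 1
--     while d > 0 and coeffs[d] % p == 0:
--         d -= 1
--     if d == 0:
--         # f is constant (or zero); degenerate
--         return affine + 1
--     lead = coeffs[d] % p
--     if d % 2 == 1:
--         pts_inf = 1
--     else:
--         ls = legendre_symbol(lead, p)
--         if ls == 0:
--             pts_inf = 1
--         elif ls == 1:
--             pts_inf = 2
--         else:
--             pts_inf = 0
--     return affine + pts_inf
-- ===== SOURCE B (Python) =====
-- def count_projective_points(coeffs, p):
--     e = (p - 1) // 2
--
--     def npts(a):
--         # number of y in F_p with y^2 = a, via Euler's criterion: 1 + (a/p)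
--         a %= p
--         if a == 0:
--             return 1
--         v = pow(a, e, p)
--         return 2 if v == 1 else (0 if v == p - 1 else 1)
--
--     # histogram of the values f(t) over F_p, built in one pass; the Euler
--     # criterion then runs once per OCCURRING residue value, not once per point
--     counts = [0] * p
--     for t in range(p):
--         ft = 0
--         for a in reversed(coeffs):
--             ft = (ft * t + a) % p
--         counts[ft] += 1
--     affine = sum(counts[v] * npts(v) for v in range(p) if counts[v])
--
--     # strip leading coefficients divisible by p (never the constant term)
--     rev = coeffs[::-1]
--     while len(rev) > 1 and rev[0] % p == 0:
--         rev = rev[1:]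
--     d = len(rev) - 1
--     if d == 0 or d % 2 == 1:
--         return affine + 1
--     return affine + npts(rev[0])
-- ===== Notes on version B (the rewrite author's own statement) =====
-- stated objective: alternative
-- what changed: B builds a histogram of the values of f(t) over F_p in one pass and computes the affine count as a weighted sum with one Euler-criterion evaluation per occurring residue value (group-by instead of A's per-point Legendre sum), evaluates f by Horner instead of a power accumulator, strips reducible leading coefficients by list reversal and slicing instead of an index while-loop, and unifies A's points-at-infinity case analysis into the same y-count function.
-- outside the precondition, e.g. on count_projective_points([1, 0, 2], -5): A returns 1, B returns 1; on count_projective_points([], 5): A raises IndexError, B returns 6; on count_projective_points([1, 2], 0): A raises ZeroDivisionError, B raises ZeroDivisionError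
-- crash fix: On empty coeffs A raises IndexError on coeffs[-1] for every p, while B returns the projective count of the zero polynomial: p + 1 for p >= 1, and 1 when range(p) is empty. — e.g. on count_projective_points([], 5): A raises IndexError, B returns 6
import Mathlib
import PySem

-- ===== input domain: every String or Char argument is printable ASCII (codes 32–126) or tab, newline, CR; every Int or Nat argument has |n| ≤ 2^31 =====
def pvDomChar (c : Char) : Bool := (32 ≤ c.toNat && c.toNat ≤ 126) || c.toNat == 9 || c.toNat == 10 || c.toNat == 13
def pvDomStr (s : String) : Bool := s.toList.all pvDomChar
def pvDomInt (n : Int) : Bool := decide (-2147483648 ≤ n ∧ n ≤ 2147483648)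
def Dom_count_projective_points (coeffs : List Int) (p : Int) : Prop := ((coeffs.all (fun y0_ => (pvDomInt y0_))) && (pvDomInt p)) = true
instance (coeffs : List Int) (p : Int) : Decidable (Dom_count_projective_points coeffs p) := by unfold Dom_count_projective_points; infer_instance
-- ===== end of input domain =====

-- B builds a histogram of the values of f over F_p in one pass and applies the Euler criterion
-- once per occurring residue value (a group-by weighted sum instead of A's per-point sum),
-- evaluates f by Horner, strips divisible leading coefficients by reversal+slicing instead of an
-- index loop, and unifies A's points-at-infinity case analysis into the y-count function
-- (alternative).

-- ===== PORT A =====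
-- '.toNat' on the exponent is exact for p ≥ 1 (the only case Pre_ admits), where (p-1)//2 ≥ 0.
def legendre_symbol (a p : Int) : Int :=
  let a' := PySem.Int.mod a p
  if a' = 0 then 0
  else
    let val := PySem.Int.powMod a' (PySem.Int.floordiv (p - 1) 2).toNat p
    if val = 1 then 1 else if val = p - 1 then -1 else 0

def count_affine_points (coeffs : List Int) (p : Int) : Int :=
  (PySem.List.pyRange 0 p 1).foldl (fun count t =>
    let s := coeffs.foldl (fun (s : Int × Int) a =>
      (PySem.Int.mod (s.1 + a * s.2) p, PySem.Int.mod (s.2 * t) p)) (0, 1)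
    count + (1 + legendre_symbol s.1 p)) 0

-- the 'while d > 0 and coeffs[d] % p == 0: d -= 1' loop; d is in range whenever coeffs ≠ []
def degree_loop (coeffs : List Int) (p : Int) : Nat → Nat
  | 0 => 0
  | d + 1 =>
    if PySem.Int.mod (coeffs.getD (d + 1) 0) p = 0 then degree_loop coeffs p d else d + 1

def count_projective_points (coeffs : List Int) (p : Int) : Int :=
  let affine := count_affine_points coeffs p
  let d := degree_loop coeffs p (coeffs.length - 1)
  if d = 0 then affine + 1
  else
    let lead := PySem.Int.mod (coeffs.getD d 0) p
    let pts_inf : Int :=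
      if d % 2 = 1 then 1
      else
        let ls := legendre_symbol lead p
        if ls = 0 then 1 else if ls = 1 then 2 else 0
    affine + pts_inf

-- ===== PORT B =====
-- npts(a) of Source B: #{y : y^2 = a}; e is the captured exponent (p-1)//2
def pv_npts (a : Int) (e : Nat) (p : Int) : Int :=
  let a' := PySem.Int.mod a p
  if a' = 0 then 1
  else
    let v := PySem.Int.powMod a' e p
    if v = 1 then 2 else if v = p - 1 then 0 else 1

-- the 'for a in reversed(coeffs): ft = (ft*t + a) % p' loop
def pv_horner (coeffs : List Int) (t p : Int) : Int :=
  coeffs.reverse.foldl (fun ft a => PySem.Int.mod (ft * t + a) p) 0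

-- the 'while len(rev) > 1 and rev[0] % p == 0: rev = rev[1:]' loop
def pv_strip (p : Int) : List Int → List Int
  | a :: b :: rest => if PySem.Int.mod a p = 0 then pv_strip p (b :: rest) else a :: b :: rest
  | l => l

-- coeffs[::-1] is ported as List.reverse (exact); '.toNat' on e is exact since Pre_ gives p ≥ 1;
-- the mutable histogram list [0]*p is ported as a Lean Array; f(t) and v lie in [0, p), so the
-- Python indexings counts[ft] / counts[v] never raise and setIfInBounds/getD are exact there;
-- d is kept as an Int so that Python's 'd % 2' on a possibly negative d stays exact.
def count_projective_points_alt (coeffs : List Int) (p : Int) : Int :=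
  let e := (PySem.Int.floordiv (p - 1) 2).toNat
  let counts := (PySem.List.pyRange 0 p 1).foldl
    (fun (arr : Array Int) t =>
      let ft := pv_horner coeffs t p
      arr.setIfInBounds ft.toNat (arr.getD ft.toNat 0 + 1)) (Array.replicate p.toNat 0)
  let affine := (((PySem.List.pyRange 0 p 1).filter
      (fun v => counts.getD v.toNat 0 != 0)).map
      (fun v => counts.getD v.toNat 0 * pv_npts v e p)).sum
  let rev := pv_strip p coeffs.reverse
  let d : Int := (rev.length : Int) - 1
  if d = 0 ∨ PySem.Int.mod d 2 = 1 then affine + 1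
  else affine + pv_npts (PySem.List.pyGetD rev 0 0) e p

-- ===== PRECONDITION & SPEC =====
-- Pre_ excludes empty coeffs (A raises IndexError on coeffs[-1]) and p ≤ 0, where A either
-- raises (ZeroDivisionError for p = 0, ValueError from pow with a negative exponent for many
-- p < 0) or returns a value of the empty range(p) loop under negative-modulus arithmetic,
-- outside the modulus domain the function is for.
def Pre_count_projective_points (coeffs : List Int) (p : Int) : Prop := coeffs ≠ [] ∧ 1 ≤ p
instance (coeffs : List Int) (p : Int) : Decidable (Pre_count_projective_points coeffs p) := by
  unfold Pre_count_projective_points; infer_instance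

def pvWitness_count_projective_points : List Int × Int := ([1, 2, 3], 5)

-- On empty coeffs A raises IndexError (coeffs[-1]) for every p, while B returns the projective
-- count of the zero polynomial: p + 1 for p ≥ 1 (p affine points (t, 0) plus [1:0:0]), 1 otherwise.
def Raises_count_projective_points (coeffs : List Int) (_p : Int) : Prop := coeffs = []
instance (coeffs : List Int) (p : Int) : Decidable (Raises_count_projective_points coeffs p) := by
  unfold Raises_count_projective_points; infer_instance
def pvRaiseWitness_count_projective_points : List Int × Int := ([], 5)
def pvRaiseWitnessOut_count_projective_points : Int := 6

def Spec_count_projective_points (coeffs : List Int) (p : Int) (out : Int) : Prop :=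
  out = count_projective_points_alt coeffs p
instance (coeffs : List Int) (p : Int) (out : Int) : Decidable (Spec_count_projective_points coeffs p out) := by
  unfold Spec_count_projective_points; infer_instance

-- ===== CLAIM (what is proved, stated in full; the proofs are below) =====
def Claim_equal_count_projective_points : Prop := ∀ (coeffs : List Int) (p : Int), Dom_count_projective_points coeffs p → Pre_count_projective_points coeffs p → Spec_count_projective_points coeffs p (count_projective_points coeffs p)

def Claim_raises_count_projective_points : Prop := (∀ (coeffs : List Int) (p : Int), Dom_count_projective_points coeffs p → Raises_count_projective_points coeffs p → ¬ Pre_count_projective_points coeffs p) ∧ (Dom_count_projective_points (pvRaiseWitness_count_projective_points.1) (pvRaiseWitness_count_projective_points.2) ∧ Raises_count_projective_points (pvRaiseWitness_count_projective_points.1) (pvRaiseWitness_count_projective_points.2) ∧ count_projective_points_alt (pvRaiseWitness_count_projective_points.1) (pvRaiseWitness_count_projective_points.2) = pvRaiseWitnessOut_count_projective_points)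

-- ===== LEMMAS AND PROOFS =====

-- the exact polynomial value sum a_i t^i
def pv_polyv (cs : List Int) (t : Int) : Int := cs.foldr (fun a r => a + t * r) 0

theorem pv_emod_self {p x : Int} : x % p ≡ x [ZMOD p] := by
  show x % p % p = x % p
  exact Int.emod_emod_of_dvd _ dvd_rfl

-- A's inner (ft, t_pow) fold computes the reduced polynomial value
theorem pv_evalA {p t : Int} (hp : 0 < p) :
    ∀ (cs : List Int) (f0 t0 : Int), f0 % p = f0 →
      (List.foldl (fun (s : Int × Int) a =>
        (PySem.Int.mod (s.1 + a * s.2) p, PySem.Int.mod (s.2 * t) p)) (f0, t0) cs).1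
      = (f0 + t0 * pv_polyv cs t) % p := by
  intro cs
  induction cs with
  | nil => intro f0 t0 h; simpa [pv_polyv] using h.symm
  | cons a cs ih =>
    intro f0 t0 h
    simp only [List.foldl_cons]
    rw [PySem.Int.mod_eq_emod_of_pos hp, PySem.Int.mod_eq_emod_of_pos hp]
    rw [ih _ _ (Int.emod_emod_of_dvd _ dvd_rfl)]
    have hcons : pv_polyv (a :: cs) t = a + t * pv_polyv cs t := rfl
    have h1 : ((f0 + a * t0) % p + (t0 * t) % p * pv_polyv cs t)
        ≡ ((f0 + a * t0) + (t0 * t) * pv_polyv cs t) [ZMOD p] :=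
      pv_emod_self.add (pv_emod_self.mul_right _)
    calc ((f0 + a * t0) % p + (t0 * t) % p * pv_polyv cs t) % p
        = ((f0 + a * t0) + (t0 * t) * pv_polyv cs t) % p := h1
      _ = (f0 + t0 * pv_polyv (a :: cs) t) % p := by
          have harith : (f0 + a * t0) + (t0 * t) * pv_polyv cs t
              = f0 + t0 * (a + t * pv_polyv cs t) := by ring
          rw [hcons, harith]

-- B's Horner fold computes the same reduced polynomial value
theorem pv_evalB {p t : Int} (hp : 0 < p) (cs : List Int) :
    pv_horner cs t p = pv_polyv cs t % p := by
  unfold pv_horner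
  rw [List.foldl_reverse]
  induction cs with
  | nil => simp [pv_polyv]
  | cons a cs ih =>
    simp only [List.foldr_cons, ih]
    rw [PySem.Int.mod_eq_emod_of_pos hp]
    have hcons : pv_polyv (a :: cs) t = a + t * pv_polyv cs t := rfl
    have h1 : (pv_polyv cs t % p * t + a) ≡ (pv_polyv cs t * t + a) [ZMOD p] :=
      (pv_emod_self.mul_right t).add_right a
    calc (pv_polyv cs t % p * t + a) % p = (pv_polyv cs t * t + a) % p := h1
      _ = pv_polyv (a :: cs) t % p := by
          have harith : pv_polyv cs t * t + a = a + t * pv_polyv cs t := by ring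
          rw [hcons, harith]

-- B's table entry is one plus A's Legendre symbol (same modulus, same exponent)
theorem pv_npts_eq_legendre (a p : Int) :
    pv_npts a (PySem.Int.floordiv (p - 1) 2).toNat p = 1 + legendre_symbol a p := by
  simp only [pv_npts, legendre_symbol]
  split_ifs <;> norm_num

theorem pv_legendre_tri (a p : Int) :
    legendre_symbol a p = -1 ∨ legendre_symbol a p = 0 ∨ legendre_symbol a p = 1 := by
  simp only [legendre_symbol]
  split_ifs <;> simp

-- the Legendre symbol only depends on a mod p
theorem pv_legendre_mod {p : Int} (hp : 0 < p) (a : Int) :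
    legendre_symbol (PySem.Int.mod a p) p = legendre_symbol a p := by
  simp only [legendre_symbol, PySem.Int.mod_eq_emod_of_pos hp, Int.emod_emod_of_dvd _ dvd_rfl]

theorem pv_horner_bounds {p : Int} (hp : 0 < p) (cs : List Int) (t : Int) :
    0 ≤ pv_horner cs t p ∧ pv_horner cs t p < p := by
  unfold pv_horner
  generalize cs.reverse = l
  have key : ∀ (l : List Int) (init : Int), 0 ≤ init → init < p →
      0 ≤ l.foldl (fun ft a => PySem.Int.mod (ft * t + a) p) init ∧
      l.foldl (fun ft a => PySem.Int.mod (ft * t + a) p) init < p := by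
    intro l
    induction l with
    | nil => intro init h1 h2; exact ⟨h1, h2⟩
    | cons a l ih =>
      intro init _ _
      exact ih _ (PySem.Int.mod_nonneg _ hp) (PySem.Int.mod_lt _ hp)
  exact key l 0 le_rfl hp

-- range(p) as a list has no duplicates
theorem pv_nodup_range {p : Int} (hp : 0 < p) : (PySem.List.pyRange 0 p 1).Nodup := by
  have h2 : p = ((p.toNat : Nat) : Int) := by omega
  rw [h2, PySem.List.pyRange_zero_natCast]
  exact List.nodup_range.map (fun a b h => by omega)

-- the histogram fold counts each value's occurrences
theorem pv_hist_getD {p : Int} (hp : 0 < p) :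
    ∀ (ys : List Int), (∀ y ∈ ys, 0 ≤ y ∧ y < p) →
      ∀ (arr : Array Int), arr.size = p.toNat →
        ∀ (v : Int), 0 ≤ v → v < p →
          (ys.foldl (fun arr y => arr.setIfInBounds y.toNat (arr.getD y.toNat 0 + 1)) arr).getD
              v.toNat 0
            = arr.getD v.toNat 0 + ys.count v := by
  intro ys
  induction ys with
  | nil => intro _ arr _ v _ _; simp
  | cons y ys ih =>
    intro hall arr hsz v hv0 hvp
    obtain ⟨hy0, hyp⟩ := hall y List.mem_cons_self
    have hylt : y.toNat < arr.size := by omega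
    have hvlt : v.toNat < arr.size := by omega
    simp only [List.foldl_cons]
    rw [ih (fun z hz => hall z (List.mem_cons_of_mem _ hz)) _
      (by rw [Array.size_setIfInBounds]; exact hsz) v hv0 hvp]
    by_cases hyv : y = v
    · subst hyv
      have harr : (arr.setIfInBounds y.toNat (arr.getD y.toNat 0 + 1)).getD y.toNat 0
          = arr.getD y.toNat 0 + 1 := by
        simp [Array.getD, hylt]
      rw [harr, List.count_cons_self]
      push_cast
      ring
    · have hne : y.toNat ≠ v.toNat := fun h => hyv (by omega)
      have hvy : v ≠ y := fun h => hyv h.symm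
      have harr : (arr.setIfInBounds y.toNat (arr.getD y.toNat 0 + 1)).getD v.toNat 0
          = arr.getD v.toNat 0 := by
        simp [Array.getD, hvlt, Array.size_setIfInBounds, Array.getElem_setIfInBounds]
        intro he
        exact absurd he hne
      rw [harr]
      simp [hyv]

-- dropping the terms a Boolean test sends to zero does not change the sum
theorem pv_filter_sum (L : List Int) (q : Int → Bool) (f : Int → Int)
    (h : ∀ v ∈ L, q v = false → f v = 0) :
    ((L.filter q).map f).sum = (L.map f).sum := by
  induction L with
  | nil => rfl
  | cons x L ih =>
    have hrest : ∀ v ∈ L, q v = false → f v = 0 :=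
      fun v hv => h v (List.mem_cons_of_mem _ hv)
    by_cases hq : q x
    · rw [List.filter_cons_of_pos hq]
      simp [ih hrest]
    · rw [List.filter_cons_of_neg (by simpa using hq)]
      simp [ih hrest, h x List.mem_cons_self (by simpa using hq)]

-- grouping: the count-weighted sum over the residue range is the plain sum over the values
theorem pv_range_count_sum {p : Int} (hp : 0 < p) (ys : List Int) (g : Int → Int)
    (hall : ∀ y ∈ ys, 0 ≤ y ∧ y < p) :
    ((PySem.List.pyRange 0 p 1).map (fun v => ((ys.count v : Int)) * g v)).sum
      = (ys.map g).sum := by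
  rw [← List.sum_toFinset _ (pv_nodup_range hp)]
  have hsub : ys.toFinset ⊆ (PySem.List.pyRange 0 p 1).toFinset := by
    intro v hv
    rw [List.mem_toFinset] at hv ⊢
    obtain ⟨h0, h1⟩ := hall v hv
    exact PySem.List.mem_pyRange_one.mpr ⟨h0, h1⟩
  rw [← Finset.sum_subset hsub (fun v _ hv => by
    rw [List.count_eq_zero_of_not_mem (by simpa using hv)]
    simp)]
  rw [Finset.sum_congr rfl
    (fun x _ => by
      show ((ys.count x : Int)) * g x = ys.count x • g x
      simp),
    Finset.sum_list_map_count ys g]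

-- degree_loop ignores an appended last element at indices below the old length
theorem pv_dl_append (ys : List Int) (a p : Int) : ∀ k, k < ys.length →
    degree_loop (ys ++ [a]) p k = degree_loop ys p k := by
  intro k
  induction k with
  | zero => intro _; rfl
  | succ d ih =>
    intro hk
    simp only [degree_loop]
    rw [List.getD_append _ _ _ _ hk]
    split_ifs
    · exact ih (Nat.lt_of_succ_lt hk)
    · rfl

theorem pv_dl_le (coeffs : List Int) (p : Int) : ∀ n, degree_loop coeffs p n ≤ n := by
  intro n
  induction n with
  | zero => exact le_rfl
  | succ d ih =>
    simp only [degree_loop]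
    split_ifs
    · exact le_trans ih (Nat.le_succ d)
    · exact le_rfl

-- B's reversal + strip computes A's reduced degree and its leading coefficient
theorem pv_strip_spec (p : Int) (l : List Int) (hne : l ≠ []) :
    (pv_strip p l.reverse).length - 1 = degree_loop l p (l.length - 1)
    ∧ PySem.List.pyGetD (pv_strip p l.reverse) 0 0
        = l.getD (degree_loop l p (l.length - 1)) 0 := by
  induction l using List.reverseRecOn with
  | nil => exact absurd rfl hne
  | append_singleton ys a ih =>
    rw [List.reverse_append, List.reverse_cons, List.reverse_nil, List.nil_append,
      List.singleton_append]
    cases ys with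
    | nil =>
      constructor
      · rfl
      · simp [pv_strip, PySem.List.pyGetD, degree_loop]
    | cons b ys' =>
      have hys : (b :: ys') ≠ [] := by simp
      have hrev : (b :: ys').reverse ≠ [] := by simp
      obtain ⟨c, rest, hcr⟩ : ∃ c rest, (b :: ys').reverse = c :: rest :=
        List.exists_cons_of_ne_nil hrev
      have hlen : ((b :: ys') ++ [a]).length - 1 = (b :: ys').length := by
        simp
      have hlast : ((b :: ys') ++ [a]).getD (b :: ys').length 0 = a := by
        rw [List.getD_eq_getElem?_getD, List.getElem?_concat_length]
        rfl
      have hlen' : (b :: ys').length = ((b :: ys').length - 1) + 1 :=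
        (Nat.succ_pred_eq_of_pos (by simp)).symm
      have hdl : degree_loop ((b :: ys') ++ [a]) p ((b :: ys').length) =
          if PySem.Int.mod a p = 0
          then degree_loop ((b :: ys') ++ [a]) p ((b :: ys').length - 1)
          else (b :: ys').length := by
        rw [hlen']
        simp only [degree_loop]
        rw [← hlen', hlast]
      rw [hlen, hdl, hcr]
      by_cases hmod : PySem.Int.mod a p = 0
      · rw [if_pos hmod]
        simp only [pv_strip, hmod, if_pos]
        rw [← hcr]
        have hd := pv_dl_le (b :: ys') p ((b :: ys').length - 1)
        have hdlt : degree_loop (b :: ys') p ((b :: ys').length - 1) < (b :: ys').length :=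
          Nat.lt_of_le_of_lt hd (by simp)
        rw [pv_dl_append _ _ _ _ (by omega)]
        obtain ⟨ih1, ih2⟩ := ih hys
        refine ⟨ih1, ?_⟩
        rw [ih2, List.getD_append _ _ _ _ hdlt]
      · rw [if_neg hmod]
        simp only [pv_strip, hmod, ite_false]
        constructor
        · rw [← hcr]
          simp
        · rw [hlast]
          simp [PySem.List.pyGetD]

-- the two affine counts agree
theorem pv_affine_eq {p : Int} (hp : 0 < p) (coeffs : List Int)
    (e : Nat) (he : e = (PySem.Int.floordiv (p - 1) 2).toNat) :
    count_affine_points coeffs p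
      = (((PySem.List.pyRange 0 p 1).filter
          (fun v => ((PySem.List.pyRange 0 p 1).foldl
            (fun (arr : Array Int) t =>
              let ft := pv_horner coeffs t p
              arr.setIfInBounds ft.toNat (arr.getD ft.toNat 0 + 1))
            (Array.replicate p.toNat 0)).getD v.toNat 0 != 0)).map
          (fun v => ((PySem.List.pyRange 0 p 1).foldl
            (fun (arr : Array Int) t =>
              let ft := pv_horner coeffs t p
              arr.setIfInBounds ft.toNat (arr.getD ft.toNat 0 + 1))
            (Array.replicate p.toNat 0)).getD v.toNat 0 * pv_npts v e p)).sum := by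
  set L := PySem.List.pyRange 0 p 1 with hL
  set ys := L.map (fun t => pv_horner coeffs t p) with hys
  have hallys : ∀ y ∈ ys, 0 ≤ y ∧ y < p := by
    intro y hy
    rw [hys, List.mem_map] at hy
    obtain ⟨t, _, rfl⟩ := hy
    exact pv_horner_bounds hp coeffs t
  set counts := L.foldl
    (fun (arr : Array Int) t =>
      let ft := pv_horner coeffs t p
      arr.setIfInBounds ft.toNat (arr.getD ft.toNat 0 + 1)) (Array.replicate p.toNat 0)
    with hcounts
  have hcnt : ∀ v, 0 ≤ v → v < p → counts.getD v.toNat 0 = ys.count v := by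
    intro v hv0 hvp
    have hvlt : v.toNat < p.toNat := by omega
    have hfold : counts = ys.foldl
        (fun (arr : Array Int) y => arr.setIfInBounds y.toNat (arr.getD y.toNat 0 + 1))
        (Array.replicate p.toNat 0) := by
      rw [hcounts, hys, List.foldl_map]
    rw [hfold, pv_hist_getD hp ys hallys _ Array.size_replicate v hv0 hvp]
    simp [Array.getD, hvlt]
  have hmemb : ∀ v ∈ L, 0 ≤ v ∧ v < p := by
    intro v hv
    rw [hL] at hv
    exact PySem.List.mem_pyRange_one.mp hv
  rw [pv_filter_sum L _ _ (fun v _ hq => by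
    have : counts.getD v.toNat 0 = 0 := by simpa using hq
    rw [this, zero_mul])]
  rw [List.map_congr_left (fun v hv => by
    obtain ⟨h0, h1⟩ := hmemb v hv
    rw [hcnt v h0 h1])]
  rw [pv_range_count_sum hp ys _ hallys, hys, List.map_map]
  unfold count_affine_points
  have hinner : ∀ (count t : Int),
      (fun count t =>
        let s := coeffs.foldl (fun (s : Int × Int) a =>
          (PySem.Int.mod (s.1 + a * s.2) p, PySem.Int.mod (s.2 * t) p)) (0, 1)
        count + (1 + legendre_symbol s.1 p)) count t
      = count + ((fun t => pv_npts (pv_horner coeffs t p) e p) t) := by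
    intro count t
    simp only []
    rw [pv_evalA hp coeffs 0 1 (Int.zero_emod p), pv_evalB hp coeffs, he,
      pv_npts_eq_legendre]
    norm_num
  rw [PySem.List.foldl_congr_mem _ _ _ _ (fun acc x _ => hinner acc x)]
  rw [PySem.List.foldl_add]
  simp [Function.comp_def]
  rw [hL]

-- ===== VERDICT (by name: the statement is the Claim_ definition above) =====
theorem count_projective_points_spec : Claim_equal_count_projective_points := by
  intro coeffs p _ hpre
  obtain ⟨hne, hp1⟩ := hpre
  have hp : 0 < p := hp1
  simp only [Spec_count_projective_points, count_projective_points,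
    count_projective_points_alt]
  rw [← pv_affine_eq hp coeffs _ rfl]
  set aff := count_affine_points coeffs p with haff
  obtain ⟨hs1, hs2⟩ := pv_strip_spec p coeffs hne
  have hsne : pv_strip p coeffs.reverse ≠ [] := by
    intro h
    have := hs2
    rw [h] at hs1
    have hlenr : coeffs.reverse ≠ [] := by simpa using hne
    -- pv_strip of a nonempty list is nonempty
    have : ∀ l : List Int, l ≠ [] → pv_strip p l ≠ [] := by
      intro l
      induction l with
      | nil => intro h'; exact absurd rfl h'
      | cons x xs ihx =>
        intro _
        cases xs with
        | nil => simp [pv_strip]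
        | cons y ys =>
          simp only [pv_strip]
          split_ifs
          · exact ihx (by simp)
          · simp
    exact absurd h (this _ hlenr)
  set dA := degree_loop coeffs p (coeffs.length - 1) with hdA
  have hslen : 1 ≤ (pv_strip p coeffs.reverse).length := List.length_pos_iff.mpr hsne
  have hdint : ((pv_strip p coeffs.reverse).length : Int) - 1 = (dA : Int) := by
    rw [← hs1]; omega
  rw [hdint, hs2]
  rw [pv_npts_eq_legendre, ← pv_legendre_mod hp (coeffs.getD dA 0)]
  by_cases hd0 : dA = 0
  · rw [if_pos hd0, if_pos (Or.inl (by simp [hd0] : ((dA : Int) = 0)))]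
  · have hd0' : ¬ ((dA : Int) = 0) := by exact_mod_cast hd0
    rw [if_neg hd0]
    by_cases hodd : dA % 2 = 1
    · have hoddI : PySem.Int.mod (dA : Int) 2 = 1 := by
        rw [PySem.Int.mod_eq_emod_of_pos (by norm_num : (0:Int) < 2)]; omega
      rw [if_pos hodd, if_pos (Or.inr hoddI)]
    · have hoddI : ¬ PySem.Int.mod (dA : Int) 2 = 1 := by
        rw [PySem.Int.mod_eq_emod_of_pos (by norm_num : (0:Int) < 2)]; omega
      rw [if_neg hodd, if_neg (show ¬(((dA : Nat) : Int) = 0 ∨ PySem.Int.mod ((dA : Nat) : Int) 2 = 1) from fun hc => hc.elim hd0' hoddI)]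
      rcases pv_legendre_tri (PySem.Int.mod (coeffs.getD dA 0) p) p with h | h | h <;>
        rw [h] <;> norm_num

@[simp] theorem count_projective_points_raises : Claim_raises_count_projective_points := by
  unfold Claim_raises_count_projective_points
  refine ⟨?_, by decide⟩
  intro coeffs p _ hr hpre
  exact hpre.1 hr
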